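-- pv_equiv track=rewrite | github.com/narennravi/Guvi---CODE_KATA | Num/21.py | notsumoftwo
-- ===== SOURCE A (Python) =====
-- def notsumoftwo(d, l):
--     flag = True
--     for i in range(len(l)-1):
--         for j in range(i+1, len(l)):
--             if (l[i] + l[j]) == d:
--                 flag = False
--                 break
--         if not flag:
--             break
--     return flag
-- ===== SOURCE B (Python) =====
-- def notsumoftwo(d, l):
--     seen = set()
--     for x in l:
--         if d - x in seen:
--             return False
--         seen.add(x)
--     return True
-- ===== Notes on version B (the rewrite author's own statement) =====
-- stated objective: faster
-- what changed: Replaced the quadratic double loop over index pairs by a single pass that keeps a hash set of seen elements and tests the complement d-x.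
import Mathlib
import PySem

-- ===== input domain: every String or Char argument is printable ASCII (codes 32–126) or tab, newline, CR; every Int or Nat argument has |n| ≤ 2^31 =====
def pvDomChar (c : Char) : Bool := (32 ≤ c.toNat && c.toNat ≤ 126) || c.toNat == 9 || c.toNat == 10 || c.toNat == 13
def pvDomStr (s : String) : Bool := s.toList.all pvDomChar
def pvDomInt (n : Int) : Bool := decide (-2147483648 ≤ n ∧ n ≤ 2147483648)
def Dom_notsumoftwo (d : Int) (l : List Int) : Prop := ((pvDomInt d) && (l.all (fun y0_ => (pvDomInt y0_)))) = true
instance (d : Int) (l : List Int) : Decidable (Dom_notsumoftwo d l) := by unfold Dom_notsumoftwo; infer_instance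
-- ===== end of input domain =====

-- B replaces A's quadratic double index loop by one pass with a set of seen elements (faster, asymptotic).

-- ===== PORT A =====
-- inner loop: for j in range(j0, len(l)): if l[i]+l[j]==d: flag=False; break  — returns the flag
def pvAInner (d : Int) (l : List Int) (i j : Nat) : Bool :=
  if _h : j < l.length then
    if l.getD i 0 + l.getD j 0 = d then false else pvAInner d l i (j + 1)
  else true
termination_by l.length - j

-- outer loop: for i in range(len(l)-1): … ; if not flag: break
def pvAOuter (d : Int) (l : List Int) (i : Nat) : Bool :=
  if _h : i < l.length - 1 then
    if pvAInner d l i (i + 1) then pvAOuter d l (i + 1) else false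
  else true
termination_by l.length - 1 - i

def notsumoftwo (d : Int) (l : List Int) : Bool := pvAOuter d l 0

-- ===== PORT B =====
def pvBLoop (d : Int) (seen : PySem.Set Int) : List Int → Bool
  | [] => true
  | x :: xs => if seen.contains (d - x) then false else pvBLoop d (PySem.Set.add seen x) xs

def notsumoftwo_alt (d : Int) (l : List Int) : Bool := pvBLoop d PySem.Set.empty l

-- ===== PRECONDITION & SPEC =====
def Spec_notsumoftwo (d : Int) (l : List Int) (out : Bool) : Prop := out = notsumoftwo_alt d l
instance (d : Int) (l : List Int) (out : Bool) : Decidable (Spec_notsumoftwo d l out) := by unfold Spec_notsumoftwo; infer_instance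

-- ===== CLAIM (what is proved, stated in full; the proofs are below) =====
def Claim_equal_notsumoftwo : Prop := ∀ (d : Int) (l : List Int), Dom_notsumoftwo d l → Spec_notsumoftwo d l (notsumoftwo d l)

-- ===== LEMMAS AND PROOFS =====

theorem pvAInner_iff (d : Int) (l : List Int) (i j : Nat) :
    pvAInner d l i j = true ↔ ∀ k, j ≤ k → k < l.length → l.getD i 0 + l.getD k 0 ≠ d := by
  induction j using pvAInner.induct (d := d) (l := l) (i := i) with
  | case1 j h h2 =>
    unfold pvAInner
    simp only [h, h2, dif_pos, if_pos, Bool.false_eq_true, false_iff, not_forall]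
    exact ⟨j, le_rfl, h, by simpa using h2⟩
  | case2 j h h2 ih =>
    unfold pvAInner
    rw [dif_pos h, if_neg h2, ih]
    constructor
    · intro H k hk hk2
      rcases Nat.lt_or_ge j k with hlt | hge
      · exact H k hlt hk2
      · have : k = j := le_antisymm hge hk
        subst this; exact h2
    · intro H k hk hk2; exact H k (Nat.le_of_lt hk) hk2
  | case3 j h =>
    unfold pvAInner
    rw [dif_neg h]
    simp only [true_iff]
    intro k hk hk2; omega

theorem pvAOuter_iff (d : Int) (l : List Int) (i : Nat) :
    pvAOuter d l i = true ↔ ∀ a b, i ≤ a → a < b → b < l.length → l.getD a 0 + l.getD b 0 ≠ d := by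
  induction i using pvAOuter.induct (d := d) (l := l) with
  | case1 i h h2 ih =>
    unfold pvAOuter
    rw [dif_pos h, if_pos h2, ih]
    rw [pvAInner_iff] at h2
    constructor
    · intro H a b ha hab hb
      rcases Nat.lt_or_ge i a with hlt | hge
      · exact H a b hlt hab hb
      · have : a = i := le_antisymm hge ha
        subst this; exact h2 b hab hb
    · intro H a b ha hab hb; exact H a b (Nat.le_of_lt ha) hab hb
  | case2 i h h2 =>
    unfold pvAOuter
    rw [dif_pos h, if_neg (by simpa using h2)]
    simp only [Bool.false_eq_true, false_iff, not_forall]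
    rw [pvAInner_iff] at h2
    simp only [not_forall] at h2
    obtain ⟨k, hk, hk2, hkeq⟩ := h2
    exact ⟨i, k, le_rfl, hk, hk2, by simpa using hkeq⟩
  | case3 i h =>
    unfold pvAOuter
    rw [dif_neg h]
    simp only [true_iff]
    intro a b ha hab hb; omega

theorem pvAOuter_pairwise (d : Int) (l : List Int) :
    pvAOuter d l 0 = true ↔ l.Pairwise (fun a b => a + b ≠ d) := by
  rw [pvAOuter_iff, List.pairwise_iff_getElem]
  constructor
  · intro H i j hi hj hij
    have := H i j (Nat.zero_le _) hij hj
    simpa [List.getD_eq_getElem?_getD, List.getElem?_eq_getElem, hi, hj] using this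
  · intro H a b _ hab hb
    have ha : a < l.length := lt_trans hab hb
    have := H a b ha hb hab
    simpa [List.getD_eq_getElem?_getD, List.getElem?_eq_getElem, ha, hb] using this

theorem pvBLoop_iff (d : Int) (seen : PySem.Set Int) (xs : List Int) :
    pvBLoop d seen xs = true ↔
      ((∀ s ∈ seen, ∀ x ∈ xs, s + x ≠ d) ∧ xs.Pairwise (fun a b => a + b ≠ d)) := by
  induction xs generalizing seen with
  | nil => simp [pvBLoop]
  | cons x xs ih =>
    simp only [pvBLoop]
    split_ifs with h
    · simp only [false_iff, not_and]
      intro H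
      have hmem : (d - x) ∈ seen := by
        simpa [PySem.Set.contains] using h
      have := H (d - x) hmem x (List.mem_cons_self ..)
      omega
    · have hnm : (d - x) ∉ seen := by
        simpa [PySem.Set.contains] using h
      rw [ih]
      constructor
      · rintro ⟨H1, H2⟩
        refine ⟨?_, ?_⟩
        · intro s hs y hy
          rcases List.mem_cons.mp hy with rfl | hy
          · intro hc; exact hnm (by simpa [show d - y = s by omega] using hs)
          · exact H1 s (by simp [PySem.Set.mem_add, hs]) y hy
        · refine List.pairwise_cons.mpr ⟨?_, H2⟩
          intro y hy
          exact H1 x (by simp [PySem.Set.mem_add]) y hy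
      · rintro ⟨H1, H2⟩
        rcases List.pairwise_cons.mp H2 with ⟨Hx, Hxs⟩
        refine ⟨?_, Hxs⟩
        intro s hs y hy
        rcases (PySem.Set.mem_add seen x s).mp hs with hs' | rfl
        · exact H1 s hs' y (List.mem_cons_of_mem _ hy)
        · exact Hx y hy

-- ===== VERDICT (by name: the statement is the Claim_ definition above) =====
theorem notsumoftwo_spec : Claim_equal_notsumoftwo := by
  intro d l _
  unfold Spec_notsumoftwo notsumoftwo notsumoftwo_alt
  have hA := pvAOuter_pairwise d l
  have hB := pvBLoop_iff d PySem.Set.empty l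
  simp only [PySem.Set.empty] at hB
  cases hEq : pvAOuter d l 0 with
  | true =>
    have := hA.mp hEq
    exact (hB.mpr ⟨by simp, this⟩).symm
  | false =>
    cases hEq2 : pvBLoop d [] l with
    | true =>
      exact absurd (hA.mpr (hB.mp hEq2).2) (by simp [hEq])
    | false => simpa [PySem.Set.empty] using hEq2.symm
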